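-- pv_equiv track=rewrite | github.com/QSOLKCB/QEC | src/qec/analysis/numerological_rejection_battery.py | _select_repeated_token
-- ===== SOURCE A (Python) =====
-- def _select_repeated_token(tokens: tuple[str, ...]) -> str | None:
--     """Return the most-frequent repeated token, tie-breaking lexicographically."""
--     counts: dict[str, int] = {}
--     for token in tokens:
--         counts[token] = counts.get(token, 0) + 1
--     repeated = [t for t, c in counts.items() if c > 1]
--     if not repeated:
--         return None
--     max_count = max(counts[t] for t in repeated)
--     return min(t for t in repeated if counts[t] == max_count)
-- ===== SOURCE B (Python) =====
-- def _select_repeated_token(tokens):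
--     """Return the most-frequent repeated token, tie-breaking lexicographically."""
--     counts = {}
--     for token in tokens:
--         counts[token] = counts.get(token, 0) + 1
--     ranked = sorted((t for t, c in counts.items() if c > 1),
--                     key=lambda t: (-counts[t], t))
--     return ranked[0] if ranked else None
-- ===== Notes on version B (the rewrite author's own statement) =====
-- stated objective: simpler
-- what changed: After the one counting pass, the two-stage max-count-then-lexicographic-min selection is replaced by a single sort of the repeated tokens under the composite key (-count, token) and taking the first element.
import Mathlib
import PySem

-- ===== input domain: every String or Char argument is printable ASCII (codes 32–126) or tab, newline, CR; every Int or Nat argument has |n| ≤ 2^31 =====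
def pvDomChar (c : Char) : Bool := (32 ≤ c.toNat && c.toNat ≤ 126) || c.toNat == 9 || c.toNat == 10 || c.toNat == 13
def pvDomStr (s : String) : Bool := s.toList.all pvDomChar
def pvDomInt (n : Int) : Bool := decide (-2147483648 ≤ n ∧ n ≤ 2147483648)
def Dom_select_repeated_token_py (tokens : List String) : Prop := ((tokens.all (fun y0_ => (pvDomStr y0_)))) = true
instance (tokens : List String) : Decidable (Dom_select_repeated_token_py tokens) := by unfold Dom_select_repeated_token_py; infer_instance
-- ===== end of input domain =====

-- B replaces A's two-stage max-count-then-lexicographic-min selection with one sort of the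
-- repeated tokens by the composite key (-count, token) and taking the first element (objective: simpler).


-- ===== PORT A =====
-- counts[t] for t taken from counts' own items is ported as getD t 0, exact since t is a key of counts.
def select_repeated_token_py (tokens : List String) : Option String :=
  let counts := tokens.foldl (fun d t => d.insert t (d.getD t 0 + 1)) (PySem.Dict.empty : PySem.Dict String Int)
  let repeated := (counts.items.filter (fun p => decide (1 < p.2))).map Prod.fst
  if repeated.isEmpty then none
  else
    match PySem.List.max? (repeated.map (fun t => counts.getD t 0)) (fun x => x) with
    | none => none  -- unreachable: repeated is nonempty here, Python's max cannot raise
    | some max_count =>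
        PySem.List.min? (repeated.filter (fun t => decide (counts.getD t 0 = max_count))) (fun x => x)

-- ===== PORT B =====
-- the tuple sort key (-counts[t], t) is ported as the lexicographic pair toLex (-counts[t], t), exact.
def select_repeated_token_py_alt (tokens : List String) : Option String :=
  let counts := tokens.foldl (fun d t => d.insert t (d.getD t 0 + 1)) (PySem.Dict.empty : PySem.Dict String Int)
  let ranked := PySem.List.sorted ((counts.items.filter (fun p => decide (1 < p.2))).map Prod.fst)
      (fun t => (toLex (-(counts.getD t 0), t) : Lex (Int × String))) false
  ranked.head?

-- ===== PRECONDITION & SPEC =====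
def Spec_select_repeated_token_py (tokens : List String) (out : Option String) : Prop := out = select_repeated_token_py_alt tokens
instance (tokens : List String) (out : Option String) : Decidable (Spec_select_repeated_token_py tokens out) := by unfold Spec_select_repeated_token_py; infer_instance

-- ===== CLAIM (what is proved, stated in full; the proofs are below) =====
def Claim_equal_select_repeated_token_py : Prop := ∀ (tokens : List String), Dom_select_repeated_token_py tokens → Spec_select_repeated_token_py tokens (select_repeated_token_py tokens)

-- ===== LEMMAS AND PROOFS =====

-- Both ports build the same counts and the same repeated list; the whole claim reduces to this
-- selection lemma over an arbitrary repeated list R and count function c.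
theorem select_core (R : List String) (c : String → Int) :
    (if R.isEmpty then none
     else
       match PySem.List.max? (R.map c) (fun x => x) with
       | none => none
       | some M => PySem.List.min? (R.filter (fun t => decide (c t = M))) (fun x => x)) =
    (PySem.List.sorted R (fun t => (toLex (-(c t), t) : Lex (Int × String))) false).head? := by
  set key : String → Lex (Int × String) := fun t => toLex (-(c t), t) with hkey
  rcases hs : PySem.List.sorted R key false with _ | ⟨m, rest⟩
  · have hR : R = [] := (PySem.List.sorted_eq_nil_iff _ _ _).mp hs
    simp [hR]
  · -- R is nonempty
    have hmem_sorted : ∀ x, x ∈ PySem.List.sorted R key false ↔ x ∈ R := by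
      intro x; exact PySem.List.mem_sorted (xs := R) (key := key) (rev := false) x
    have hmR : m ∈ R := (hmem_sorted m).mp (by simp [hs])
    have hRne : R ≠ [] := by intro h; subst h; simp at hmR
    have hhead : ∀ y ∈ R, key m ≤ key y := PySem.List.key_head_sorted_le R key hs
    -- max? is some M
    rcases hM : PySem.List.max? (R.map c) (fun x => x) with _ | M
    · exact absurd ((PySem.List.max?_eq_none_iff _ _).mp hM) (by simp [hRne])
    · have hMmax : ∀ y ∈ R.map c, y ≤ M := PySem.List.max?_isMax hM
      have hMmem : M ∈ R.map c := PySem.List.max?_mem hM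
      obtain ⟨y0, hy0R, hy0⟩ := List.mem_map.mp hMmem
      -- c m = M
      have hcmM : c m = M := by
        have h1 : c m ≤ M := hMmax _ (List.mem_map.mpr ⟨m, hmR, rfl⟩)
        have h2 : key m ≤ key y0 := hhead y0 hy0R
        rw [hkey] at h2
        rcases Prod.Lex.le_iff.mp h2 with h | ⟨h, _⟩ <;> simp at h <;> omega
      -- m is in the filtered list
      have hmF : m ∈ R.filter (fun t => decide (c t = M)) :=
        List.mem_filter.mpr ⟨hmR, by simp [hcmM]⟩
      have hFne : R.filter (fun t => decide (c t = M)) ≠ [] := by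
        intro h; rw [h] at hmF; simp at hmF
      rcases hmin : PySem.List.min? (R.filter (fun t => decide (c t = M))) (fun x => x) with _ | a
      · exact absurd ((PySem.List.min?_eq_none_iff _ _).mp hmin) hFne
      · have haF := PySem.List.min?_mem hmin
        have hamin : ∀ y ∈ R.filter (fun t => decide (c t = M)), a ≤ y :=
          PySem.List.min?_isMin hmin
        obtain ⟨haR, hca⟩ := List.mem_filter.mp haF
        have hcaM : c a = M := by simpa using hca
        have h1 : a ≤ m := hamin m hmF
        have h2 : m ≤ a := by
          have h := hhead a haR
          rw [hkey] at h
          rcases Prod.Lex.le_iff.mp h with h' | ⟨_, h'⟩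
          · simp at h'; omega
          · exact h'
        have : a = m := le_antisymm h1 h2
        simp [hRne, hmin, this]

-- ===== VERDICT (by name: the statement is the Claim_ definition above) =====
theorem select_repeated_token_py_spec : Claim_equal_select_repeated_token_py := by
  intro tokens _
  unfold Spec_select_repeated_token_py select_repeated_token_py select_repeated_token_py_alt
  exact select_core _ _
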